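-- pv_equiv track=rewrite | github.com/riteshkukreja/Search-Engine | methods.py | formatLink
-- ===== SOURCE A (Python) =====
-- def formatLink(link, domain, url):
--     if link[0:7] == 'http://':
--         return link
--     elif link[0:8] == 'https://':
--         return link
--     elif link[0:2] == '//':
--         if domain[0:7] == 'http://':
--             link = 'http:' + link
--         else:
--             link = 'https:' + link
--         return link
--     elif link[0:1] == '/':
--         if domain[-1] == '/':
--             link = domain + link[1:]
--         else:
--             link = domain + link
--         return link
--     elif link[0:7] == 'mailto:':
--         link = '[' + link +']'
--         return link
--     elif link[0:3] == '../':
--         pos = url.rfind('/')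
--         link = link[3:]
--         return formatLink(link, domain, url)
--     elif link[0:1] == '.':
--         link = domain + link[1:]
--         return link
--     else:
--         if domain[-1] == '/':
--             link = domain + link
--         else:
--             link = domain + '/' + link
--         return link
-- ===== SOURCE B (Python) =====
-- def formatLink(link, domain, url):
--     # iterative strip of leading '../' segments replaces A's self-recursion;
--     # then a single flat if/elif chain (mailto checked before '/', which is safe
--     # since the two prefixes are mutually exclusive); A's dead `pos` line dropped.
--     while link[:3] == '../':
--         link = link[3:]
--     if link[:7] == 'http://' or link[:8] == 'https://':
--         return link
--     if link[:2] == '//':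
--         return ('http:' if domain[:7] == 'http://' else 'https:') + link
--     if link[:7] == 'mailto:':
--         return '[' + link + ']'
--     if link[:1] == '/':
--         return domain + (link[1:] if domain[-1] == '/' else link)
--     if link[:1] == '.':
--         return domain + link[1:]
--     return domain + link if domain[-1] == '/' else domain + '/' + link
-- ===== Notes on version B (the rewrite author's own statement) =====
-- stated objective: simpler
-- what changed: Replaces A's self-recursion on '../' prefixes with an iterative while-loop that strips them first, then a single flat branch chain (merged http/https return, mailto hoisted before '/', dead `pos = url.rfind('/')` removed).
-- outside the precondition, e.g. on formatLink('http://x.com', '', ''): A returns 'http://x.com', B returns 'http://x.com'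
import Mathlib
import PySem

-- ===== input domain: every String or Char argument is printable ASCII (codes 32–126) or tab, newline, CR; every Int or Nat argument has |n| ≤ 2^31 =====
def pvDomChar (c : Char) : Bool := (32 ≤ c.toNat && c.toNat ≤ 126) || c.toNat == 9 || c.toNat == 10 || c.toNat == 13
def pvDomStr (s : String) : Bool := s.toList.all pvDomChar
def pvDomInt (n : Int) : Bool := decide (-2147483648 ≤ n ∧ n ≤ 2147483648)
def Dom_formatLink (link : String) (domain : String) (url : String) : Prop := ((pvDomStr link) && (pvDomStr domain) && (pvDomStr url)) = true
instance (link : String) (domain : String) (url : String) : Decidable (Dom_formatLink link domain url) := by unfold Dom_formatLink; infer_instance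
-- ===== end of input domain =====

-- B replaces A's self-recursion on leading '../' with an iterative strip loop followed by
-- one flat branch chain (simpler decomposition, same cost); return-value equivalence only.


-- ===== PORT A =====
-- literal transliteration of A on the code-point lists (slices via PySem; domain[-1] via pyGet?,
-- which is `none` exactly where Python raises IndexError — those inputs are outside Pre_)
def pvFmtA (l : List Char) (d : List Char) (u : List Char) : List Char :=
  if PySem.List.slice l (some 0) (some 7) = "http://".toList then l
  else if PySem.List.slice l (some 0) (some 8) = "https://".toList then l
  else if PySem.List.slice l (some 0) (some 2) = "//".toList then
    (if PySem.List.slice d (some 0) (some 7) = "http://".toList then "http:".toList ++ l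
     else "https:".toList ++ l)
  else if PySem.List.slice l (some 0) (some 1) = "/".toList then
    (if PySem.List.pyGet? d (-1) = some '/' then d ++ PySem.List.slice l (some 1) none
     else d ++ l)
  else if PySem.List.slice l (some 0) (some 7) = "mailto:".toList then
    "[".toList ++ l ++ "]".toList
  else if h : PySem.List.slice l (some 0) (some 3) = "../".toList then
    let _pos := PySem.Chars.rfind u "/".toList   -- A computes this and never uses it
    pvFmtA (PySem.List.slice l (some 3) none) d u
  else if PySem.List.slice l (some 0) (some 1) = ".".toList then
    d ++ PySem.List.slice l (some 1) none
  else if PySem.List.pyGet? d (-1) = some '/' then d ++ l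
  else d ++ "/".toList ++ l
termination_by l.length
decreasing_by
  rw [PySem.List.slice_zero_start, PySem.List.slice_to l (by omega : (0:Int) ≤ 3)] at h
  rw [PySem.List.slice_from l (by omega : (0:Int) ≤ 3)]
  have h3 : l.take 3 = ['.', '.', '/'] := by simpa using h
  have hlen : 3 ≤ l.length := by
    have := congrArg List.length h3
    simp at this; omega
  simp; omega

def formatLink (link : String) (domain : String) (url : String) : String :=
  String.ofList (pvFmtA link.toList domain.toList url.toList)

-- ===== PORT B =====
-- the while-loop stripping leading '../'
def pvStripDots (l : List Char) : List Char :=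
  if h : PySem.List.slice l (some 0) (some 3) = "../".toList then
    pvStripDots (PySem.List.slice l (some 3) none)
  else l
termination_by l.length
decreasing_by
  rw [PySem.List.slice_zero_start, PySem.List.slice_to l (by omega : (0:Int) ≤ 3)] at h
  rw [PySem.List.slice_from l (by omega : (0:Int) ≤ 3)]
  have h3 : l.take 3 = ['.', '.', '/'] := by simpa using h
  have hlen : 3 ≤ l.length := by
    have := congrArg List.length h3
    simp at this; omega
  simp; omega

def pvFmtB (l0 : List Char) (d : List Char) (_u : List Char) : List Char :=
  let l := pvStripDots l0
  if PySem.List.slice l (some 0) (some 7) = "http://".toList ∨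
     PySem.List.slice l (some 0) (some 8) = "https://".toList then l
  else if PySem.List.slice l (some 0) (some 2) = "//".toList then
    (if PySem.List.slice d (some 0) (some 7) = "http://".toList then "http:".toList
     else "https:".toList) ++ l
  else if PySem.List.slice l (some 0) (some 7) = "mailto:".toList then
    "[".toList ++ l ++ "]".toList
  else if PySem.List.slice l (some 0) (some 1) = "/".toList then
    d ++ (if PySem.List.pyGet? d (-1) = some '/' then PySem.List.slice l (some 1) none else l)
  else if PySem.List.slice l (some 0) (some 1) = ".".toList then
    d ++ PySem.List.slice l (some 1) none
  else if PySem.List.pyGet? d (-1) = some '/' then d ++ l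
  else d ++ "/".toList ++ l

def formatLink_alt (link : String) (domain : String) (url : String) : String :=
  String.ofList (pvFmtB link.toList domain.toList url.toList)

-- ===== PRECONDITION & SPEC =====
-- Pre_ excludes the empty domain: with domain = '' A raises IndexError on domain[-1] in the
-- relative-link branches; links with an absolute prefix (http://, https://, //, mailto:) are
-- excluded along with them even though A returns them unchanged there (see cites).
def Pre_formatLink (link : String) (domain : String) (url : String) : Prop := domain ≠ ""
instance (link : String) (domain : String) (url : String) : Decidable (Pre_formatLink link domain url) := by unfold Pre_formatLink; infer_instance
def pvWitness_formatLink : String × String × String := ("../a.html", "http://ex.com/", "http://ex.com/x/")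

def Spec_formatLink (link : String) (domain : String) (url : String) (out : String) : Prop := out = formatLink_alt link domain url
instance (link : String) (domain : String) (url : String) (out : String) : Decidable (Spec_formatLink link domain url out) := by unfold Spec_formatLink; infer_instance

-- ===== CLAIM (what is proved, stated in full; the proofs are below) =====
def Claim_equal_formatLink : Prop := ∀ (link : String) (domain : String) (url : String), Dom_formatLink link domain url → Pre_formatLink link domain url → Spec_formatLink link domain url (formatLink link domain url)

-- ===== LEMMAS AND PROOFS =====

-- slice-to-take/drop normalisations for the numeral bounds the ports use
theorem pvSl1 (x : List Char) : PySem.List.slice x (some 0) (some 1) = x.take 1 := by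
  rw [PySem.List.slice_zero_start, PySem.List.slice_to x (by omega : (0:Int) ≤ 1)]; rfl
theorem pvSl2 (x : List Char) : PySem.List.slice x (some 0) (some 2) = x.take 2 := by
  rw [PySem.List.slice_zero_start, PySem.List.slice_to x (by omega : (0:Int) ≤ 2)]; rfl
theorem pvSl3 (x : List Char) : PySem.List.slice x (some 0) (some 3) = x.take 3 := by
  rw [PySem.List.slice_zero_start, PySem.List.slice_to x (by omega : (0:Int) ≤ 3)]; rfl
theorem pvSl7 (x : List Char) : PySem.List.slice x (some 0) (some 7) = x.take 7 := by
  rw [PySem.List.slice_zero_start, PySem.List.slice_to x (by omega : (0:Int) ≤ 7)]; rfl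
theorem pvSl8 (x : List Char) : PySem.List.slice x (some 0) (some 8) = x.take 8 := by
  rw [PySem.List.slice_zero_start, PySem.List.slice_to x (by omega : (0:Int) ≤ 8)]; rfl
theorem pvFrom1 (x : List Char) : PySem.List.slice x (some 1) none = x.drop 1 := by
  rw [PySem.List.slice_from x (by omega : (0:Int) ≤ 1)]; rfl
theorem pvFrom3 (x : List Char) : PySem.List.slice x (some 3) none = x.drop 3 := by
  rw [PySem.List.slice_from x (by omega : (0:Int) ≤ 3)]; rfl

theorem pvStripDots_eq_self (l : List Char) (h3 : l.take 3 ≠ ['.', '.', '/']) :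
    pvStripDots l = l := by
  rw [pvStripDots, pvSl3, dif_neg]
  simpa using h3

theorem pvMain (l d u : List Char) : pvFmtA l d u = pvFmtB l d u := by
  by_cases h3 : l.take 3 = ['.', '.', '/']
  · have hl : l = '.' :: '.' :: '/' :: l.drop 3 := by
      conv_lhs => rw [← List.take_append_drop 3 l, h3]
      rfl
    have hA : pvFmtA l d u = pvFmtA (l.drop 3) d u := by
      conv_lhs => rw [hl]
      rw [pvFmtA]
      simp only [pvSl1, pvSl2, pvSl3, pvSl7, pvSl8, pvFrom1, pvFrom3]
      simp
    have hstrip : pvStripDots l = pvStripDots (l.drop 3) := by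
      conv_lhs => rw [hl]
      rw [pvStripDots]
      simp only [pvSl3, pvFrom3]
      simp
    have hB : pvFmtB l d u = pvFmtB (l.drop 3) d u := by
      simp only [pvFmtB, hstrip]
    rw [hA, hB]
    exact pvMain (l.drop 3) d u
  · have hs : pvStripDots l = l := pvStripDots_eq_self l h3
    rw [pvFmtA]
    simp only [pvFmtB, hs, pvSl1, pvSl2, pvSl3, pvSl7, pvSl8, pvFrom1, pvFrom3]
    by_cases hm : l.take 7 = "mailto:".toList
    · have t1 : l.take 1 = ['m'] := by
        have := congrArg (List.take 1) hm; simpa [List.take_take] using this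
      have t2 : l.take 2 = ['m', 'a'] := by
        have := congrArg (List.take 2) hm; simpa [List.take_take] using this
      simp [hm, t1, t2]
    · split_ifs <;> simp_all
termination_by l.length
decreasing_by
  have := congrArg List.length h3
  simp at this
  simp
  omega

-- ===== VERDICT (by name: the statement is the Claim_ definition above) =====
theorem formatLink_spec : Claim_equal_formatLink := by
  intro link domain url _ _
  unfold Spec_formatLink formatLink formatLink_alt
  rw [pvMain]
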